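-- pv_equiv track=rewrite | github.com/orenhe/myip | myip/cmd_parsing.py | split_output_into_blocks
-- ===== SOURCE A (Python) =====
-- def split_output_into_blocks(out):
--     cur_entry = ""
--     first_line = True
--     for line in out.split("\n"):
--         if first_line:
--             first_line = False
--             cur_entry += line + "\n"
--             continue
--
--         if not line.startswith(" ") and not line.startswith("\t"):
--             yield cur_entry
--             cur_entry = line + "\n"
--         else:
--             cur_entry += line + "\n"
--
--     yield cur_entry # last but not least
-- ===== SOURCE B (Python) =====
-- def split_output_into_blocks(out):
--     # Peel off one block at a time: a block is the first line plus the run of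
--     # indented lines that follows it; recurse on the remainder.
--     def blocks(lines):
--         i = 1
--         while i < len(lines) and lines[i].startswith((" ", "\t")):
--             i += 1
--         yield "".join(l + "\n" for l in lines[:i])
--         if i < len(lines):
--             yield from blocks(lines[i:])
--     yield from blocks(out.split("\n"))
-- ===== Notes on version B (the rewrite author's own statement) =====
-- stated objective: alternative
-- what changed: B is a recursive block-at-a-time decomposition: it scans forward over the run of indented lines following the first line, yields that slice rendered as one block, and recurses on the remainder, instead of A's line-by-line accumulate-and-yield string concatenation.
import Mathlib
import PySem

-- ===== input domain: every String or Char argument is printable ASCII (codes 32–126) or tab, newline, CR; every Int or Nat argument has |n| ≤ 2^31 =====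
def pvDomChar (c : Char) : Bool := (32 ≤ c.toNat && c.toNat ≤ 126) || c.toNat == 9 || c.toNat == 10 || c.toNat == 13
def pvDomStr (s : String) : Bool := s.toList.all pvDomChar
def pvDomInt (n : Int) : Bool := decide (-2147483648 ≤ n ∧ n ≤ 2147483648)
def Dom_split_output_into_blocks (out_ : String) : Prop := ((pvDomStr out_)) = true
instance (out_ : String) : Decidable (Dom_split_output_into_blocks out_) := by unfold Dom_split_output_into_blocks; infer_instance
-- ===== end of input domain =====

-- B peels off one block at a time (first line + the following run of indented lines,
-- then recurse on the remainder) instead of A's forward accumulate-and-yield loop;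
-- objective: alternative decomposition. (A is a generator; values are compared as
-- the produced sequence of strings.)

-- ===== PORT A =====
-- A's loop state: current entry `cur` and the blocks yielded so far `acc`.
def pvALoop : List (List Char) → List Char → List (List Char) → List (List Char)
  | [], cur, acc => acc ++ [cur]
  | l :: rest, cur, acc =>
    if !(PySem.Chars.startswith l [' ']) && !(PySem.Chars.startswith l ['\t']) then
      pvALoop rest (l ++ ['\n']) (acc ++ [cur])
    else
      pvALoop rest (cur ++ (l ++ ['\n'])) acc

def split_output_into_blocks (out_ : String) : List String :=
  match PySem.Chars.splitOn out_.toList ['\n'] with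
  | [] => [String.mk ['\n']]            -- unreachable: str.split never returns []
  | first :: rest => (pvALoop rest (first ++ ['\n']) []).map String.mk

-- ===== PORT B =====
-- line.startswith((" ", "\t"))
def pvIndent (l : List Char) : Bool :=
  PySem.Chars.startswith l [' '] || PySem.Chars.startswith l ['\t']

-- ''.join(l + '\n' for l in g)
def pvRender (g : List (List Char)) : List Char :=
  PySem.Chars.join [] (g.map (· ++ ['\n']))

-- `blocks(lines)`: the while loop over i is the span (takeWhile/dropWhile) of the tail.
def pvBlocksC : List (List Char) → List (List Char)
  | [] => []
  | l :: rest =>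
    pvRender (l :: rest.takeWhile pvIndent) :: pvBlocksC (rest.dropWhile pvIndent)
  termination_by l => l.length
  decreasing_by
    simpa using Nat.lt_succ_of_le (List.length_dropWhile_le ..)

def split_output_into_blocks_alt (out_ : String) : List String :=
  (pvBlocksC (PySem.Chars.splitOn out_.toList ['\n'])).map String.mk

-- ===== PRECONDITION & SPEC =====
def Spec_split_output_into_blocks (out_ : String) (out : List String) : Prop := out = split_output_into_blocks_alt out_
instance (out_ : String) (out : List String) : Decidable (Spec_split_output_into_blocks out_ out) := by unfold Spec_split_output_into_blocks; infer_instance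

-- ===== CLAIM (what is proved, stated in full; the proofs are below) =====
def Claim_equal_split_output_into_blocks : Prop := ∀ (out_ : String), Dom_split_output_into_blocks out_ → Spec_split_output_into_blocks out_ (split_output_into_blocks out_)

-- ===== LEMMAS AND PROOFS =====

lemma go_ne_nil (sep : List Char) : ∀ (fuel : Nat) (l cur : List Char) (acc : List (List Char)),
    PySem.Chars.splitOn.go sep fuel l cur acc ≠ [] := by
  intro fuel
  induction fuel with
  | zero => intro l cur acc; simp [PySem.Chars.splitOn.go]
  | succ n ih =>
    intro l cur acc
    cases l with
    | nil => simp [PySem.Chars.splitOn.go]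
    | cons c rest =>
      rw [PySem.Chars.splitOn.go]
      split <;> apply ih

lemma splitOn_ne_nil (s sep : List Char) : PySem.Chars.splitOn s sep ≠ [] :=
  go_ne_nil sep _ s [] []

lemma pvRender_nil : pvRender [] = [] := rfl

lemma pvBlocksC_nil : pvBlocksC [] = [] := by rw [pvBlocksC]

lemma pvBlocksC_cons (l : List Char) (rest : List (List Char)) :
    pvBlocksC (l :: rest) =
      pvRender (l :: rest.takeWhile pvIndent) :: pvBlocksC (rest.dropWhile pvIndent) := by
  rw [pvBlocksC]

lemma pvRender_cons (l : List Char) (g : List (List Char)) :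
    pvRender (l :: g) = (l ++ ['\n']) ++ pvRender g := by
  cases g with
  | nil => simp [pvRender, PySem.Chars.join_singleton, PySem.Chars.join_nil]
  | cons q r => simp [pvRender, List.map_cons, PySem.Chars.join_cons_cons]

-- A's loop equals B's block-at-a-time recursion, for any prefix `pre` of the current entry.
lemma pvALoop_eq (rest : List (List Char)) :
    ∀ (pre : List Char) (acc : List (List Char)),
      pvALoop rest pre acc =
        acc ++ (pre ++ pvRender (rest.takeWhile pvIndent))
              :: pvBlocksC (rest.dropWhile pvIndent) := by
  induction rest with
  | nil => intro pre acc; simp [pvALoop, pvBlocksC_nil, pvRender_nil]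
  | cons l rest ih =>
    intro pre acc
    by_cases hs : pvIndent l = true
    · have h1 : (!(PySem.Chars.startswith l [' ']) && !(PySem.Chars.startswith l ['\t'])) = false := by
        unfold pvIndent at hs
        cases h : PySem.Chars.startswith l [' '] <;> simp_all
      simp only [pvALoop, h1, Bool.false_eq_true, if_false, List.takeWhile_cons, hs,
        List.dropWhile_cons, if_true, ih]
      simp [pvRender_cons, List.append_assoc]
    · have h1 : (!(PySem.Chars.startswith l [' ']) && !(PySem.Chars.startswith l ['\t'])) = true := by
        unfold pvIndent at hs
        cases h : PySem.Chars.startswith l [' '] <;> simp_all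
      have hs' : pvIndent l = false := by simp_all
      simp only [pvALoop, h1, if_true, List.takeWhile_cons, hs', Bool.false_eq_true, if_false,
        List.dropWhile_cons, ih, pvBlocksC_cons]
      simp [pvRender_cons, pvRender_nil, List.append_assoc]

-- ===== VERDICT (by name: the statement is the Claim_ definition above) =====
theorem split_output_into_blocks_spec : Claim_equal_split_output_into_blocks := by
  intro out_ _
  unfold Spec_split_output_into_blocks split_output_into_blocks split_output_into_blocks_alt
  cases h : PySem.Chars.splitOn out_.toList ['\n'] with
  | nil => exact absurd h (splitOn_ne_nil _ _)
  | cons first rest =>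
    simp only [pvALoop_eq, pvBlocksC_cons, List.map_cons, List.nil_append]
    simp [pvRender_cons]
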